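-- pv_equiv track=rewrite | github.com/Oleksii-Lasiichuk/UCU | midtermm/tetiana.py | remove_wrong_checkers
-- ===== SOURCE A (Python) =====
-- from copy import deepcopy
--
-- def remove_wrong_checkers(board: list, inplace=True) -> list | None:
--     """
--     Removes checkers that are placed on white squares,
--     which is not allowed in the game of checkers.
--
--     Parameters:
--     -----------
--     board : list[list[tuple[str, str]]]
--         A 2D list representing the board, where each element is a tuple:
--         (square_color, checker), with 'square_color' as 'b' or 'w',
--         and 'checker' as 'w', 'b', or ''.
--
--     inplace : bool, optional
--         If True, modifies the input board in place and returns None.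
--         If False, returns a new board with the wrong checkers removed,
--             leaving the input board unchanged.
--
--     Returns:
--     --------
--     None or list[list[tuple[str, str]]]:
--         If inplace is True, returns None after modifying the board in place.
--         If inplace is False, returns a new board with checkers
--             removed from white squares.
--         If there were no wrong checkers to remove, returns None.
--
--     Example:
--     --------
--     >>> board = [[('b', 'w'), ('w', ''), ('b', '')],\
--  [('w', ''), ('b', 'b'), ('w', 'w')],\
--  [('b', ''), ('w', ''), ('b', '')]]
--     >>> remove_wrong_checkers(board)
--     >>> board
--     [[('b', 'w'), ('w', ''), ('b', '')],\
--  [('w', ''), ('b', 'b'), ('w', '')],\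
--  [('b', ''), ('w', ''), ('b', '')]]
--     >>> remove_wrong_checkers(board) is None
--     True
--     >>> board = [[('b', 'w'), ('w', ''), ('b', '')],\
--  [('w', ''), ('b', 'b'), ('w', 'w')],\
--  [('b', ''), ('w', ''), ('b', '')]]
--     >>> remove_wrong_checkers(board, inplace=False)
--     [[('b', 'w'), ('w', ''), ('b', '')],\
--  [('w', ''), ('b', 'b'), ('w', '')],\
--  [('b', ''), ('w', ''), ('b', '')]]
--     >>> board
--     [[('b', 'w'), ('w', ''), ('b', '')],\
--  [('w', ''), ('b', 'b'), ('w', 'w')],\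
--  [('b', ''), ('w', ''), ('b', '')]]
--     """
--     board = board if inplace else deepcopy(board)
--     flag = False
--     for i, row in enumerate(board):
--         for j, cell in enumerate(row):
--             if cell[0] == 'w' and cell[1]:
--                 board[i][j] = ('w', '')
--                 flag = True
--     return None if inplace or not flag else board
-- ===== SOURCE B (Python) =====
-- def remove_wrong_checkers(board: list, inplace=True) -> list | None:
--     # Pass 1: collect coordinates of checkers sitting on white squares.
--     wrong = [(i, j)
--              for i, row in enumerate(board)
--              for j, cell in enumerate(row)
--              if cell[0] == 'w' and cell[1]]
--     if not wrong:
--         return None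
--     # Pass 2: apply the fixes (in place, or on a fresh copy).
--     target = board if inplace else [list(row) for row in board]
--     for i, j in wrong:
--         target[i][j] = ('w', '')
--     return None if inplace else target
-- ===== Notes on version B (the rewrite author's own statement) =====
-- stated objective: alternative
-- what changed: Replaces A's fused scan-and-mutate-with-boolean-flag by two passes: one scan building the list of offending coordinates (list emptiness replaces the flag, deciding the early None return and whether a copy is needed), then a separate apply pass writing ('w','') at exactly those coordinates.
import Mathlib
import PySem

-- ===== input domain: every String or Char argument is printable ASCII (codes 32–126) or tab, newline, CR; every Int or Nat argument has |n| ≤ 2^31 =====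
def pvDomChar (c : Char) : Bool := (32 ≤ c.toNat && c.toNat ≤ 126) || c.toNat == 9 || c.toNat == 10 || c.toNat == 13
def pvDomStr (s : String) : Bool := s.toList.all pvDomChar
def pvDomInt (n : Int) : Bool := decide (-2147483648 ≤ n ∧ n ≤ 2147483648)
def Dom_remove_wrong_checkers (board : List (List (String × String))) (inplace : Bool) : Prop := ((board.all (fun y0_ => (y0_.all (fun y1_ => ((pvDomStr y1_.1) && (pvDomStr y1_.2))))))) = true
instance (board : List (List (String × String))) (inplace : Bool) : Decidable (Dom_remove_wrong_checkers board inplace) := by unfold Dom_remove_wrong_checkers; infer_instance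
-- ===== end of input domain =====

-- B replaces A's fused scan-and-mutate-with-flag by a coordinate-collecting pass followed by an
-- apply pass (list emptiness replaces the flag). Equivalence is about the RETURN value; both
-- Pythons also mutate `board` in place identically when inplace=True.

-- ===== PORT A =====
def remove_wrong_checkers (board : List (List (String × String))) (inplace : Bool) : Option (List (List (String × String))) :=
  let res := (PySem.List.enumerate board 0).foldl
    (fun (st : List (List (String × String)) × Bool) (ir : Int × List (String × String)) =>
      (PySem.List.enumerate ir.2 0).foldl
        (fun (st : List (List (String × String)) × Bool) (jc : Int × (String × String)) =>
          if jc.2.1 == "w" && jc.2.2 != "" then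
            (PySem.List.pySetD st.1 ir.1
               (PySem.List.pySetD (PySem.List.pyGetD st.1 ir.1 []) jc.1 ("w", "")), true)
          else st)
        st)
    (board, false)
  if inplace || !res.2 then none else some res.1

-- ===== PORT B =====
def remove_wrong_checkers_alt (board : List (List (String × String))) (inplace : Bool) : Option (List (List (String × String))) :=
  let wrong := (PySem.List.enumerate board 0).flatMap
    (fun (ir : Int × List (String × String)) =>
      (PySem.List.enumerate ir.2 0).filterMap
        (fun (jc : Int × (String × String)) =>
          if jc.2.1 == "w" && jc.2.2 != "" then some (ir.1, jc.1) else none))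
  if wrong.isEmpty then none
  else
    let target := wrong.foldl
      (fun (t : List (List (String × String))) (ij : Int × Int) =>
        PySem.List.pySetD t ij.1
          (PySem.List.pySetD (PySem.List.pyGetD t ij.1 []) ij.2 ("w", ""))) board
    if inplace then none else some target

-- ===== PRECONDITION & SPEC =====
def Spec_remove_wrong_checkers (board : List (List (String × String))) (inplace : Bool) (out : Option (List (List (String × String)))) : Prop := out = remove_wrong_checkers_alt board inplace
instance (board : List (List (String × String))) (inplace : Bool) (out : Option (List (List (String × String)))) : Decidable (Spec_remove_wrong_checkers board inplace out) := by unfold Spec_remove_wrong_checkers; infer_instance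

-- ===== CLAIM (what is proved, stated in full; the proofs are below) =====
def Claim_equal_remove_wrong_checkers : Prop := ∀ (board : List (List (String × String))) (inplace : Bool), Dom_remove_wrong_checkers board inplace → Spec_remove_wrong_checkers board inplace (remove_wrong_checkers board inplace)

-- ===== LEMMAS AND PROOFS =====

def pvBad (c : String × String) : Bool := c.1 == "w" && c.2 != ""
def pvFix (c : String × String) : String × String := if pvBad c then ("w", "") else c

-- A's inner loop over one row, starting at column m of row i.
theorem pv_innerA (i : Nat) :
    ∀ (cells : List (String × String)) (m : Nat) (b : List (List (String × String))) (f : Bool),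
      i < b.length → (b.getD i []).drop m = cells →
      (PySem.List.enumerate cells (m : Int)).foldl
        (fun (st : List (List (String × String)) × Bool) (jc : Int × (String × String)) =>
          if jc.2.1 == "w" && jc.2.2 != "" then
            (PySem.List.pySetD st.1 (i : Int)
               (PySem.List.pySetD (PySem.List.pyGetD st.1 (i : Int) []) jc.1 ("w", "")), true)
          else st) (b, f)
      = (b.set i ((b.getD i []).take m ++ cells.map pvFix), f || cells.any pvBad) := by
  intro cells
  induction cells with
  | nil =>
    intro m b f hi hd
    have hlen : (b.getD i []).length ≤ m := List.drop_eq_nil_iff.mp hd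
    rw [PySem.List.enumerate_nil]
    simp only [List.foldl_nil, List.map_nil, List.append_nil, List.any_nil, Bool.or_false]
    rw [List.take_of_length_le hlen, List.getD_eq_getElem _ _ hi, List.set_getElem_self]
  | cons c cs ih =>
    intro m b f hi hd
    have hm : m < (b.getD i []).length := by
      rcases Nat.lt_or_ge m (b.getD i []).length with h | h
      · exact h
      · rw [List.drop_eq_nil_iff.mpr h] at hd; exact absurd hd (by simp)
    have hcast : ((m : Int) + 1) = ((m + 1 : Nat) : Int) := by push_cast; ring
    have htail : (b.getD i []).drop (m + 1) = cs := by
      rw [← List.tail_drop, hd]; rfl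
    rw [PySem.List.enumerate_cons, List.foldl_cons, hcast]
    by_cases hb : (c.1 == "w" && c.2 != "") = true
    · simp only [hb, if_true]
      have hset : PySem.List.pySetD b (i : Int)
          (PySem.List.pySetD (PySem.List.pyGetD b (i : Int) []) (m : Int) ("w", ""))
          = b.set i ((b.getD i []).set m ("w", "")) := by simp
      rw [hset]
      have hi' : i < (b.set i ((b.getD i []).set m ("w", ""))).length := by simpa using hi
      have hrow' : (b.set i ((b.getD i []).set m ("w", ""))).getD i []
          = (b.getD i []).set m ("w", "") := by
        rw [List.getD_eq_getElem?_getD, List.getElem?_set_self hi, Option.getD_some]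
      have hd' : ((b.set i ((b.getD i []).set m ("w", ""))).getD i []).drop (m + 1) = cs := by
        rw [hrow', List.drop_set, if_pos (Nat.lt_succ_self m)]
        exact htail
      rw [ih (m + 1) _ true hi' hd', hrow']
      simp only [Prod.mk.injEq]
      constructor
      · rw [List.set_set]
        congr 1
        rw [List.take_add_one, List.take_set,
            List.set_eq_of_length_le (le_trans (List.length_take_le _ _) (le_refl m)),
            List.getElem?_set_self hm]
        simp [pvFix, pvBad, hb]
      · simp [pvBad, hb, List.any_cons]
    · rw [if_neg hb]
      rw [ih (m + 1) b f hi htail]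
      simp only [Prod.mk.injEq]
      have hgm : (b.getD i [])[m]? = some c := by
        have h0 := List.getElem?_drop (xs := b.getD i []) (i := m) (j := 0)
        rw [hd] at h0; simpa using h0.symm
      constructor
      · congr 1
        rw [List.take_add_one, hgm]
        simp [pvFix, pvBad, hb]
      · simp [pvBad, hb, List.any_cons]

-- A's outer loop over rows, starting at row k.
theorem pv_outerA :
    ∀ (rows : List (List (String × String))) (k : Nat) (b : List (List (String × String))) (f : Bool),
      b.drop k = rows →
      (PySem.List.enumerate rows (k : Int)).foldl
        (fun (st : List (List (String × String)) × Bool) (ir : Int × List (String × String)) =>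
          (PySem.List.enumerate ir.2 0).foldl
            (fun (st : List (List (String × String)) × Bool) (jc : Int × (String × String)) =>
              if jc.2.1 == "w" && jc.2.2 != "" then
                (PySem.List.pySetD st.1 ir.1
                   (PySem.List.pySetD (PySem.List.pyGetD st.1 ir.1 []) jc.1 ("w", "")), true)
              else st) st) (b, f)
      = (b.take k ++ rows.map (List.map pvFix), f || rows.any (fun r => r.any pvBad)) := by
  intro rows
  induction rows with
  | nil =>
    intro k b f hd
    have hlen : b.length ≤ k := List.drop_eq_nil_iff.mp hd
    rw [PySem.List.enumerate_nil]
    simp only [List.foldl_nil, List.map_nil, List.append_nil, List.any_nil, Bool.or_false]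
    rw [List.take_of_length_le hlen]
  | cons row rest ih =>
    intro k b f hd
    have hk : k < b.length := by
      rcases Nat.lt_or_ge k b.length with h | h
      · exact h
      · rw [List.drop_eq_nil_iff.mpr h] at hd; exact absurd hd (by simp)
    have h1 : b[k]? = some row := by
      have h0 := List.getElem?_drop (xs := b) (i := k) (j := 0)
      rw [hd] at h0; simpa using h0.symm
    have hrow : b.getD k [] = row := by
      rw [List.getD_eq_getElem?_getD, h1, Option.getD_some]
    have hcast : ((k : Int) + 1) = ((k + 1 : Nat) : Int) := by push_cast; ring
    have htail : b.drop (k + 1) = rest := by rw [← List.tail_drop, hd]; rfl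
    rw [PySem.List.enumerate_cons, List.foldl_cons, hcast]
    have hinner := pv_innerA k row 0 b f hk (by rw [List.drop_zero, hrow])
    rw [hrow] at hinner
    simp only [Nat.cast_zero, List.take_zero, List.nil_append] at hinner
    simp only []
    rw [hinner]
    have hd1 : (b.set k (row.map pvFix)).drop (k + 1) = rest := by
      rw [List.drop_set, if_pos (Nat.lt_succ_self k)]
      exact htail
    rw [ih (k + 1) _ (f || row.any pvBad) hd1]
    simp only [Prod.mk.injEq]
    constructor
    · rw [List.take_add_one, List.take_set,
          List.set_eq_of_length_le (le_trans (List.length_take_le _ _) (le_refl k)),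
          List.getElem?_set_self hk]
      simp
    · simp [List.any_cons, Bool.or_assoc]

-- B's coordinate list for one row is empty iff the row has no bad cell.
theorem pv_filterMap_nil_iff (i : Int) :
    ∀ (cells : List (String × String)) (m : Nat),
      ((PySem.List.enumerate cells (m : Int)).filterMap
        (fun (jc : Int × (String × String)) =>
          if jc.2.1 == "w" && jc.2.2 != "" then some (i, jc.1) else none)) = []
      ↔ cells.any pvBad = false := by
  intro cells
  induction cells with
  | nil => intro m; simp [PySem.List.enumerate_nil]
  | cons c cs ih =>
    intro m
    have hcast : ((m : Int) + 1) = ((m + 1 : Nat) : Int) := by push_cast; ring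
    rw [PySem.List.enumerate_cons, List.filterMap_cons, hcast]
    by_cases hb : (c.1 == "w" && c.2 != "") = true
    · simp [hb, pvBad]
    · simp only [hb, Bool.false_eq_true, if_false]
      rw [ih (m + 1)]
      simp [pvBad, hb, List.any_cons]

-- B's full coordinate list is empty iff the board has no bad cell.
theorem pv_flat_nil_iff :
    ∀ (rows : List (List (String × String))) (k : Nat),
      ((PySem.List.enumerate rows (k : Int)).flatMap
        (fun (ir : Int × List (String × String)) =>
          (PySem.List.enumerate ir.2 0).filterMap
            (fun (jc : Int × (String × String)) =>
              if jc.2.1 == "w" && jc.2.2 != "" then some (ir.1, jc.1) else none))) = []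
      ↔ rows.any (fun r => r.any pvBad) = false := by
  intro rows
  induction rows with
  | nil => intro k; simp [PySem.List.enumerate_nil]
  | cons row rest ih =>
    intro k
    have hcast : ((k : Int) + 1) = ((k + 1 : Nat) : Int) := by push_cast; ring
    rw [PySem.List.enumerate_cons, List.flatMap_cons, hcast]
    have hf := pv_filterMap_nil_iff (k : Int) row 0
    simp only [Nat.cast_zero] at hf
    simp only [List.append_eq_nil_iff]
    rw [hf, ih (k + 1)]
    simp [List.any_cons, Bool.or_eq_false_iff]

-- Applying B's writes for one row.
theorem pv_applyInner (i : Nat) :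
    ∀ (cells : List (String × String)) (m : Nat) (b : List (List (String × String))),
      i < b.length → (b.getD i []).drop m = cells →
      ((PySem.List.enumerate cells (m : Int)).filterMap
        (fun (jc : Int × (String × String)) =>
          if jc.2.1 == "w" && jc.2.2 != "" then some ((i : Int), jc.1) else none)).foldl
        (fun (t : List (List (String × String))) (ij : Int × Int) =>
          PySem.List.pySetD t ij.1
            (PySem.List.pySetD (PySem.List.pyGetD t ij.1 []) ij.2 ("w", ""))) b
      = b.set i ((b.getD i []).take m ++ cells.map pvFix) := by
  intro cells
  induction cells with
  | nil =>
    intro m b hi hd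
    have hlen : (b.getD i []).length ≤ m := List.drop_eq_nil_iff.mp hd
    rw [PySem.List.enumerate_nil]
    simp only [List.filterMap_nil, List.foldl_nil, List.map_nil, List.append_nil]
    rw [List.take_of_length_le hlen, List.getD_eq_getElem _ _ hi, List.set_getElem_self]
  | cons c cs ih =>
    intro m b hi hd
    have hm : m < (b.getD i []).length := by
      rcases Nat.lt_or_ge m (b.getD i []).length with h | h
      · exact h
      · rw [List.drop_eq_nil_iff.mpr h] at hd; exact absurd hd (by simp)
    have hcast : ((m : Int) + 1) = ((m + 1 : Nat) : Int) := by push_cast; ring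
    have htail : (b.getD i []).drop (m + 1) = cs := by
      rw [← List.tail_drop, hd]; rfl
    rw [PySem.List.enumerate_cons, List.filterMap_cons, hcast]
    by_cases hb : (c.1 == "w" && c.2 != "") = true
    · simp only [hb, if_true]
      rw [List.foldl_cons]
      simp only []
      have hset : PySem.List.pySetD b (i : Int)
          (PySem.List.pySetD (PySem.List.pyGetD b (i : Int) []) (m : Int) ("w", ""))
          = b.set i ((b.getD i []).set m ("w", "")) := by simp
      rw [hset]
      have hi' : i < (b.set i ((b.getD i []).set m ("w", ""))).length := by simpa using hi
      have hrow' : (b.set i ((b.getD i []).set m ("w", ""))).getD i []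
          = (b.getD i []).set m ("w", "") := by
        rw [List.getD_eq_getElem?_getD, List.getElem?_set_self hi, Option.getD_some]
      have hd' : ((b.set i ((b.getD i []).set m ("w", ""))).getD i []).drop (m + 1) = cs := by
        rw [hrow', List.drop_set, if_pos (Nat.lt_succ_self m)]
        exact htail
      rw [ih (m + 1) _ hi' hd', hrow', List.set_set]
      congr 1
      rw [List.take_add_one, List.take_set,
          List.set_eq_of_length_le (le_trans (List.length_take_le _ _) (le_refl m)),
          List.getElem?_set_self hm]
      simp [pvFix, pvBad, hb]
    · simp only [hb, Bool.false_eq_true, if_false]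
      rw [ih (m + 1) b hi htail]
      congr 1
      have hgm : (b.getD i [])[m]? = some c := by
        have h0 := List.getElem?_drop (xs := b.getD i []) (i := m) (j := 0)
        rw [hd] at h0; simpa using h0.symm
      rw [List.take_add_one, hgm]
      simp [pvFix, pvBad, hb]

-- Applying B's writes for all rows from row k on.
theorem pv_applyOuter :
    ∀ (rows : List (List (String × String))) (k : Nat) (b : List (List (String × String))),
      b.drop k = rows →
      ((PySem.List.enumerate rows (k : Int)).flatMap
        (fun (ir : Int × List (String × String)) =>
          (PySem.List.enumerate ir.2 0).filterMap
            (fun (jc : Int × (String × String)) =>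
              if jc.2.1 == "w" && jc.2.2 != "" then some (ir.1, jc.1) else none))).foldl
        (fun (t : List (List (String × String))) (ij : Int × Int) =>
          PySem.List.pySetD t ij.1
            (PySem.List.pySetD (PySem.List.pyGetD t ij.1 []) ij.2 ("w", ""))) b
      = b.take k ++ rows.map (List.map pvFix) := by
  intro rows
  induction rows with
  | nil =>
    intro k b hd
    have hlen : b.length ≤ k := List.drop_eq_nil_iff.mp hd
    rw [PySem.List.enumerate_nil]
    simp only [List.flatMap_nil, List.foldl_nil, List.map_nil, List.append_nil]
    rw [List.take_of_length_le hlen]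
  | cons row rest ih =>
    intro k b hd
    have hk : k < b.length := by
      rcases Nat.lt_or_ge k b.length with h | h
      · exact h
      · rw [List.drop_eq_nil_iff.mpr h] at hd; exact absurd hd (by simp)
    have h1 : b[k]? = some row := by
      have h0 := List.getElem?_drop (xs := b) (i := k) (j := 0)
      rw [hd] at h0; simpa using h0.symm
    have hrow : b.getD k [] = row := by
      rw [List.getD_eq_getElem?_getD, h1, Option.getD_some]
    have hcast : ((k : Int) + 1) = ((k + 1 : Nat) : Int) := by push_cast; ring
    have htail : b.drop (k + 1) = rest := by rw [← List.tail_drop, hd]; rfl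
    rw [PySem.List.enumerate_cons, List.flatMap_cons, hcast, List.foldl_append]
    simp only []
    have hinner := pv_applyInner k row 0 b hk (by rw [List.drop_zero, hrow])
    rw [hrow] at hinner
    simp only [Nat.cast_zero, List.take_zero, List.nil_append] at hinner
    rw [hinner]
    have hd1 : (b.set k (row.map pvFix)).drop (k + 1) = rest := by
      rw [List.drop_set, if_pos (Nat.lt_succ_self k)]
      exact htail
    rw [ih (k + 1) _ hd1]
    rw [List.take_add_one, List.take_set,
        List.set_eq_of_length_le (le_trans (List.length_take_le _ _) (le_refl k)),
        List.getElem?_set_self hk]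
    simp

-- ===== VERDICT (by name: the statement is the Claim_ definition above) =====
theorem remove_wrong_checkers_spec : Claim_equal_remove_wrong_checkers := by
  intro board inplace _
  unfold Spec_remove_wrong_checkers
  simp only [remove_wrong_checkers, remove_wrong_checkers_alt]
  have hA := pv_outerA board 0 board false rfl
  simp only [Nat.cast_zero, List.take_zero, List.nil_append, Bool.false_or] at hA
  have hApply := pv_applyOuter board 0 board rfl
  simp only [Nat.cast_zero, List.take_zero, List.nil_append] at hApply
  have hNil := pv_flat_nil_iff board 0
  simp only [Nat.cast_zero] at hNil
  by_cases hAny : (board.any fun r => r.any pvBad) = true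
  · have hne : ¬ ((PySem.List.enumerate board 0).flatMap
        (fun ir => (PySem.List.enumerate ir.2 0).filterMap
          (fun jc => if jc.2.1 == "w" && jc.2.2 != "" then some (ir.1, jc.1) else none))) = [] := by
      intro h
      rw [hNil.mp h] at hAny
      exact absurd hAny (by simp)
    have hempty : ((PySem.List.enumerate board 0).flatMap
        (fun ir => (PySem.List.enumerate ir.2 0).filterMap
          (fun jc => if jc.2.1 == "w" && jc.2.2 != "" then some (ir.1, jc.1) else none))).isEmpty = false := by
      cases h : ((PySem.List.enumerate board 0).flatMap
        (fun ir => (PySem.List.enumerate ir.2 0).filterMap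
          (fun jc => if jc.2.1 == "w" && jc.2.2 != "" then some (ir.1, jc.1) else none))).isEmpty
      · rfl
      · exact absurd (List.isEmpty_iff.mp h) hne
    rw [hA, hApply, hempty]
    cases inplace <;> simp [hAny]
  · have hAny' : (board.any fun r => r.any pvBad) = false := by
      simpa using hAny
    have hw : ((PySem.List.enumerate board 0).flatMap
        (fun ir => (PySem.List.enumerate ir.2 0).filterMap
          (fun jc => if jc.2.1 == "w" && jc.2.2 != "" then some (ir.1, jc.1) else none))) = [] :=
      hNil.mpr hAny'
    rw [hA, hw]
    simp [hAny']
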